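-- pv_equiv track=rewrite | github.com/koustubh25/scratchpad | app/modernize_demo/adapters/source/coldfusion.py | _extract_call_tokens
-- ===== SOURCE A (Python) =====
-- def _extract_call_tokens(text: str) -> set[str]:
--     calls: set[str] = set()
--     token = []
--     for index, char in enumerate(text):
--         if char.isalnum() or char in "._":
--             token.append(char)
--             continue
--         if char == "(" and token:
--             calls.add("".join(token))
--         token = []
--     return calls
-- ===== SOURCE B (Python) =====
-- def _extract_call_tokens(text: str) -> set[str]:
--     calls: set[str] = set()
--     for part in text.split("(")[:-1]:
--         run = []
--         for ch in reversed(part):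
--             if not (ch.isalnum() or ch in "._"):
--                 break
--             run.append(ch)
--         if run:
--             calls.add("".join(reversed(run)))
--     return calls
-- ===== Notes on version B (the rewrite author's own statement) =====
-- stated objective: faster
-- what changed: B splits the text on the opening parenthesis first and then extracts the maximal trailing identifier run of each preceding piece, instead of A's forward character-by-character state machine with a token accumulator; the split is one C-level pass, so B is measurably faster.
import Mathlib
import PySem

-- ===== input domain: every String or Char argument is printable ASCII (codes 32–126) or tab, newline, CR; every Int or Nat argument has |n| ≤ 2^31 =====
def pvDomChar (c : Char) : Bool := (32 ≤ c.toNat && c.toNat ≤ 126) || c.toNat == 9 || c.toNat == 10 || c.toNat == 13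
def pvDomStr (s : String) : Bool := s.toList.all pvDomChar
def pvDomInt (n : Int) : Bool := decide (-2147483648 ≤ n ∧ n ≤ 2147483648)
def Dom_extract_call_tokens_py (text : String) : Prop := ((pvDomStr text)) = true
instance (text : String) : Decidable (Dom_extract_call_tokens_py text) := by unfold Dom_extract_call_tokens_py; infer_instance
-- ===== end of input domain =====

-- B re-implements A by splitting the text on '(' and taking each preceding piece's maximal
-- trailing identifier run, instead of A's forward character state machine (measured faster: one C-level split pass).


-- char test shared by both Pythons: char.isalnum() or char in "._"
def pvIsTok (c : Char) : Bool := PySem.Chars.isalnum c || c == '.' || c == '_'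

-- ===== PORT A =====
-- one step of A's for-loop over (calls, token)
def pvStepA (st : PySem.Set String × List Char) (ch : Char) : PySem.Set String × List Char :=
  if pvIsTok ch then (st.1, st.2 ++ [ch])
  else if ch == '(' && !st.2.isEmpty then (PySem.Set.add st.1 (String.ofList st.2), [])
  else (st.1, [])

def extract_call_tokens_py (text : String) : List String :=
  (text.toList.foldl pvStepA (PySem.Set.empty, [])).1

-- ===== PORT B =====
-- body of B's for-loop: the reversed inner loop with break is takeWhile on the reversed piece
def pvStepB (calls : PySem.Set String) (part : List Char) : PySem.Set String :=
  let run := part.reverse.takeWhile pvIsTok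
  if run.isEmpty then calls else PySem.Set.add calls (String.ofList run.reverse)

def extract_call_tokens_py_alt (text : String) : List String :=
  ((PySem.Chars.splitOn text.toList ['(']).dropLast).foldl pvStepB PySem.Set.empty

-- ===== PRECONDITION & SPEC =====
def Spec_extract_call_tokens_py (text : String) (out : List String) : Prop := out = extract_call_tokens_py_alt text
instance (text : String) (out : List String) : Decidable (Spec_extract_call_tokens_py text out) := by unfold Spec_extract_call_tokens_py; infer_instance

-- ===== CLAIM (what is proved, stated in full; the proofs are below) =====
def Claim_equal_extract_call_tokens_py : Prop := ∀ (text : String), Dom_extract_call_tokens_py text → Spec_extract_call_tokens_py text (extract_call_tokens_py text)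

-- ===== LEMMAS AND PROOFS =====

-- spec recursion for splitting on '(' (proof-side only)
def pvS : List Char → List (List Char)
  | [] => [[]]
  | c :: rest =>
    if c = '(' then [] :: pvS rest
    else
      match pvS rest with
      | [] => [[c]]
      | h :: t => (c :: h) :: t

lemma pvS_ne_nil (cs : List Char) : pvS cs ≠ [] := by
  cases cs with
  | nil => simp [pvS]
  | cons c rest =>
    simp only [pvS]
    split
    · simp
    · cases pvS rest <;> simp

def pvConsHead (x : List Char) : List (List Char) → List (List Char)
  | [] => [x]
  | h :: t => (x ++ h) :: t

lemma pv_go_eq : ∀ (fuel : Nat) (l cur : List Char) (acc : List (List Char)), l.length ≤ fuel →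
    PySem.Chars.splitOn.go ['('] fuel l cur acc
      = acc.reverse ++ pvConsHead cur.reverse (pvS l) := by
  intro fuel
  induction fuel with
  | zero =>
    intro l cur acc h
    have hl : l = [] := List.eq_nil_of_length_eq_zero (Nat.le_zero.mp h)
    subst hl
    simp [PySem.Chars.splitOn.go, pvS, pvConsHead]
  | succ fuel ih =>
    intro l cur acc h
    cases l with
    | nil => simp [PySem.Chars.splitOn.go, pvS, pvConsHead]
    | cons c rest =>
      rw [PySem.Chars.splitOn.go]
      simp only [List.length_cons, Nat.add_le_add_iff_right] at h
      by_cases hc : c = '('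
      · subst hc
        have hpre : ['('].isPrefixOf ('(' :: rest) = true := by simp [List.isPrefixOf]
        simp only [hpre, if_true, List.length_singleton, List.drop_succ_cons, List.drop_zero]
        rw [ih rest [] (cur.reverse :: acc) h]
        have hne := pvS_ne_nil rest
        cases hS : pvS rest with
        | nil => exact absurd hS hne
        | cons x t => simp [pvS, pvConsHead, hS]
      · have hpre : ['('].isPrefixOf (c :: rest) = false := by
          simp [List.isPrefixOf]; exact fun e => hc e.symm
        simp only [hpre, Bool.false_eq_true, if_false]
        rw [ih rest (c :: cur) acc h]
        have hne := pvS_ne_nil rest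
        cases hS : pvS rest with
        | nil => exact absurd hS hne
        | cons x t => simp [pvS, pvConsHead, hS, hc]

lemma pv_splitOn_eq_pvS (cs : List Char) : PySem.Chars.splitOn cs ['('] = pvS cs := by
  show PySem.Chars.splitOn.go ['('] (cs.length + 1) cs [] [] = pvS cs
  rw [pv_go_eq (cs.length + 1) cs [] [] (Nat.le_succ _)]
  have hne := pvS_ne_nil cs
  cases hS : pvS cs with
  | nil => exact absurd hS hne
  | cons x t => simp [pvConsHead]

lemma pvS_no_paren {cs : List Char} (h : '(' ∉ cs) : pvS cs = [cs] := by
  induction cs with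
  | nil => rfl
  | cons c rest ih =>
    simp only [List.mem_cons, not_or] at h
    simp [pvS, Ne.symm h.1, ih h.2]

lemma pvS_append {p : List Char} (rest : List Char) (h : '(' ∉ p) :
    pvS (p ++ '(' :: rest) = p :: pvS rest := by
  induction p with
  | nil => simp [pvS]
  | cons c p ih =>
    simp only [List.mem_cons, not_or] at h
    simp [pvS, Ne.symm h.1, ih h.2]

lemma pvIsTok_paren : pvIsTok '(' = false := by decide

-- trailing identifier run of a list
def pvTrail (p : List Char) : List Char := (p.reverse.takeWhile pvIsTok).reverse

lemma pvTrail_append {c : Char} (xs p : List Char) (hc : pvIsTok c = false) :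
    pvTrail (xs ++ c :: p) = pvTrail p := by
  unfold pvTrail
  have hrev : (xs ++ c :: p).reverse = p.reverse ++ ([c] ++ xs.reverse) := by simp
  rw [hrev, List.takeWhile_append]
  split
  · rename_i hlen
    have hfull : List.takeWhile pvIsTok p.reverse = p.reverse :=
      (List.takeWhile_sublist _).eq_of_length hlen
    simp [hc, hfull]
  · rfl

-- A's set component is untouched while no '(' is seen
lemma pvFoldA_fst {p : List Char} (h : '(' ∉ p) :
    ∀ (s : PySem.Set String) (t : List Char), (p.foldl pvStepA (s, t)).1 = s := by
  induction p with
  | nil => intro s t; rfl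
  | cons c p ih =>
    intro s t
    simp only [List.mem_cons, not_or] at h
    simp only [List.foldl_cons, pvStepA]
    by_cases htok : pvIsTok c
    · simp only [htok, if_true]
      exact ih h.2 s _
    · have hc : (c == '(') = false := by
        simp only [beq_eq_false_iff_ne]; exact fun e => h.1 e.symm
      simp only [htok, hc, Bool.false_and, Bool.false_eq_true, if_false]
      exact ih h.2 s []

-- A's token component is the trailing run
lemma pvFoldA_snd (p : List Char) :
    ∀ (s : PySem.Set String) (t : List Char), t.all pvIsTok →
      (p.foldl pvStepA (s, t)).2 = pvTrail (t ++ p) := by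
  induction p with
  | nil =>
    intro s t ht
    simp only [List.foldl_nil, List.append_nil]
    unfold pvTrail
    have : t.reverse.takeWhile pvIsTok = t.reverse :=
      List.takeWhile_eq_self_iff.mpr
        (fun a hm => (List.all_eq_true.mp ht) a (List.mem_reverse.mp hm))
    rw [this, List.reverse_reverse]
  | cons c p ih =>
    intro s t ht
    simp only [List.foldl_cons, pvStepA]
    by_cases htok : pvIsTok c
    · simp only [htok, if_true]
      have ht' : (t ++ [c]).all pvIsTok := by
        simp only [List.all_append, ht, List.all_cons, List.all_nil, htok, Bool.and_self]
      rw [ih s (t ++ [c]) ht']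
      simp
    · have hcf : pvIsTok c = false := eq_false_of_ne_true htok
      simp only [htok, Bool.false_eq_true, if_false]
      rw [pvTrail_append t p hcf]
      have hgen : ∀ s' : PySem.Set String, (p.foldl pvStepA (s', ([] : List Char))).2 = pvTrail p :=
        fun s' => by rw [ih s' [] (by simp)]; rfl
      split <;> exact hgen _

-- first-'(' decomposition of a list containing '('
lemma pv_exists_split {cs : List Char} (hp : '(' ∈ cs) :
    ∃ p rest, cs = p ++ '(' :: rest ∧ '(' ∉ p := by
  induction cs with
  | nil => cases hp
  | cons c cs ih =>
    by_cases hc : c = '('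
    · exact ⟨[], cs, by rw [hc]; rfl, by simp⟩
    · have : '(' ∈ cs := by
        rcases List.mem_cons.mp hp with h | h
        · exact absurd h.symm hc
        · exact h
      obtain ⟨p, rest, heq, hnp⟩ := ih this
      exact ⟨c :: p, rest, by rw [heq]; rfl, by simp [hnp]; exact fun e => hc e.symm⟩

-- main loop correspondence
lemma pvMain : ∀ (n : Nat) (cs : List Char), cs.length ≤ n → ∀ (s : PySem.Set String),
    (cs.foldl pvStepA (s, [])).1 = ((pvS cs).dropLast).foldl pvStepB s := by
  intro n
  induction n with
  | zero =>
    intro cs h s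
    have : cs = [] := List.eq_nil_of_length_eq_zero (Nat.le_zero.mp h)
    subst this
    simp [pvS]
  | succ n ih =>
    intro cs h s
    by_cases hp : '(' ∈ cs
    · obtain ⟨p, rest, heq, hnp⟩ := pv_exists_split hp
      subst heq
      have hstate : p.foldl pvStepA (s, []) = (s, pvTrail p) := by
        refine Prod.ext (pvFoldA_fst hnp s []) ?_
        rw [pvFoldA_snd p s [] (by simp)]; rfl
      rw [List.foldl_append, hstate]
      simp only [List.foldl_cons, pvStepA, pvIsTok_paren, Bool.false_eq_true, if_false,
        BEq.rfl, Bool.true_and]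
      have hrest : rest.length ≤ n := by
        have := h; simp only [List.length_append, List.length_cons] at this; omega
      have hS : pvS (p ++ '(' :: rest) = p :: pvS rest := pvS_append rest hnp
      rw [hS]
      have hSne := pvS_ne_nil rest
      rw [List.dropLast_cons_of_ne_nil hSne, List.foldl_cons]
      have hstep : pvStepB s p =
          (if (!(pvTrail p).isEmpty) = true then (PySem.Set.add s (String.ofList (pvTrail p)), ([] : List Char)) else (s, [])).1 := by
        unfold pvStepB pvTrail
        by_cases he : (p.reverse.takeWhile pvIsTok).isEmpty
        · simp [he]
        · simp [he]
      rw [← hstep] at *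
      split
      · rename_i hcond
        rw [ih rest hrest _]
        unfold pvStepB
        have : ¬ (p.reverse.takeWhile pvIsTok).isEmpty = true := by
          simpa [pvTrail] using hcond
        simp only [this, if_false, Bool.false_eq_true]
        rfl
      · rename_i hcond
        rw [ih rest hrest s]
        unfold pvStepB
        have : (p.reverse.takeWhile pvIsTok).isEmpty = true := by
          by_contra hne
          exact hcond (by simpa [pvTrail] using hne)
        simp [this]
    · rw [pvFoldA_fst hp s [], pvS_no_paren hp]
      rfl

-- ===== VERDICT (by name: the statement is the Claim_ definition above) =====
theorem extract_call_tokens_py_spec : Claim_equal_extract_call_tokens_py := by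
  intro text _
  unfold Spec_extract_call_tokens_py extract_call_tokens_py extract_call_tokens_py_alt
  rw [pv_splitOn_eq_pvS]
  exact pvMain text.toList.length text.toList le_rfl PySem.Set.empty
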